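-- pv_equiv track=rewrite | github.com/krzynio/Matcha-TTS | matcha/text/cleaners.py | handle_special_vocals
-- ===== SOURCE A (Python) =====
-- def handle_special_vocals(text):
--     """Convert special vocal tokens to non-phonemic placeholders that espeak won't touch."""
--     # Use punctuation-based placeholders that espeak will preserve
--     placeholder_map = {
--         "<UH>": " ~UH~ ",
--         "<UM>": " ~UM~ ",
--         "<LAUGH>": " ~LAUGH~ ",
--         "<GIGGLE>": " ~GIGGLE~ ",
--         "<CHUCKLE>": " ~CHUCKLE~ ",
--         "<SIGH>": " ~SIGH~ ",
--         "<COUGH>": " ~COUGH~ ",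
--         "<SNIFFLE>": " ~SNIFFLE~ ",
--         "<GROAN>": " ~GROAN~ ",
--         "<YAWN>": " ~YAWN~ ",
--         "<GASP>": " ~GASP~ ",
--     }
--
--     # Replace tokens with punctuation placeholders
--     for original_token, placeholder in placeholder_map.items():
--         text = text.replace(original_token, placeholder)
--
--     return text
-- ===== SOURCE B (Python) =====
-- _TOKENS = [
--     ("<UH>", " ~UH~ "),
--     ("<UM>", " ~UM~ "),
--     ("<LAUGH>", " ~LAUGH~ "),
--     ("<GIGGLE>", " ~GIGGLE~ "),
--     ("<CHUCKLE>", " ~CHUCKLE~ "),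
--     ("<SIGH>", " ~SIGH~ "),
--     ("<COUGH>", " ~COUGH~ "),
--     ("<SNIFFLE>", " ~SNIFFLE~ "),
--     ("<GROAN>", " ~GROAN~ "),
--     ("<YAWN>", " ~YAWN~ "),
--     ("<GASP>", " ~GASP~ "),
-- ]
--
--
-- def handle_special_vocals(text):
--     """Convert special vocal tokens to non-phonemic placeholders in one
--     left-to-right scan, substituting each matched token via the table."""
--     out = []
--     i = 0
--     n = len(text)
--     while i < n:
--         for token, placeholder in _TOKENS:
--             if text.startswith(token, i):
--                 out.append(placeholder)
--                 i += len(token)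
--                 break
--         else:
--             out.append(text[i])
--             i += 1
--     return "".join(out)
-- ===== Notes on version B (the rewrite author's own statement) =====
-- stated objective: alternative
-- what changed: Replaces A's eleven sequential full-string str.replace passes with a single left-to-right scan that tries the token table at each position and substitutes via lookup.
import Mathlib
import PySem

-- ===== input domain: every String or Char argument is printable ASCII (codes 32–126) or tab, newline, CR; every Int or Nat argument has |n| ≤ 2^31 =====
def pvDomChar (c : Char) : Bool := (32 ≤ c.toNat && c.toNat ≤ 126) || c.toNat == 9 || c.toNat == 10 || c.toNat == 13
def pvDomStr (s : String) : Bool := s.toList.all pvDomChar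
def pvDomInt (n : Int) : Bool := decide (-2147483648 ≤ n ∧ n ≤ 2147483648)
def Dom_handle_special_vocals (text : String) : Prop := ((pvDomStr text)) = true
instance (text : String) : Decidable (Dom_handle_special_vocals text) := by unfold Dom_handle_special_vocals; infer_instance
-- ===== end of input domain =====

-- B replaces A's eleven sequential full-string replace passes by ONE left-to-right scan
-- substituting matched tokens via a table (objective: alternative algorithm, same cost class).

-- ===== PORT A =====
def handle_special_vocals (text : String) : String :=
  let t := PySem.Str.replace text "<UH>" " ~UH~ "
  let t := PySem.Str.replace t "<UM>" " ~UM~ "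
  let t := PySem.Str.replace t "<LAUGH>" " ~LAUGH~ "
  let t := PySem.Str.replace t "<GIGGLE>" " ~GIGGLE~ "
  let t := PySem.Str.replace t "<CHUCKLE>" " ~CHUCKLE~ "
  let t := PySem.Str.replace t "<SIGH>" " ~SIGH~ "
  let t := PySem.Str.replace t "<COUGH>" " ~COUGH~ "
  let t := PySem.Str.replace t "<SNIFFLE>" " ~SNIFFLE~ "
  let t := PySem.Str.replace t "<GROAN>" " ~GROAN~ "
  let t := PySem.Str.replace t "<YAWN>" " ~YAWN~ "
  let t := PySem.Str.replace t "<GASP>" " ~GASP~ "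
  t

-- ===== PORT B =====
-- the token table of Source B (_TOKENS), as (token, placeholder) character lists
def pvTokens : List (List Char × List Char) :=
  [("<UH>".toList, " ~UH~ ".toList),
   ("<UM>".toList, " ~UM~ ".toList),
   ("<LAUGH>".toList, " ~LAUGH~ ".toList),
   ("<GIGGLE>".toList, " ~GIGGLE~ ".toList),
   ("<CHUCKLE>".toList, " ~CHUCKLE~ ".toList),
   ("<SIGH>".toList, " ~SIGH~ ".toList),
   ("<COUGH>".toList, " ~COUGH~ ".toList),
   ("<SNIFFLE>".toList, " ~SNIFFLE~ ".toList),
   ("<GROAN>".toList, " ~GROAN~ ".toList),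
   ("<YAWN>".toList, " ~YAWN~ ".toList),
   ("<GASP>".toList, " ~GASP~ ".toList)]

-- termination helper for the scan (every token in the table is nonempty)
lemma pvTokens_pos : ∀ tp ∈ pvTokens, 0 < tp.1.length := by decide

-- Source B's while-loop: at each position try the table (first match wins), emit the
-- placeholder and skip the token, else emit the character and advance
def pvScan (l : List Char) : List Char :=
  match l with
  | [] => []
  | c :: t =>
    match h : pvTokens.find? (fun tp => tp.1.isPrefixOf (c :: t)) with
    | some tp => tp.2 ++ pvScan (List.drop tp.1.length (c :: t))
    | none => c :: pvScan t
termination_by l.length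
decreasing_by
  · have hm := pvTokens_pos _ (List.mem_of_find?_eq_some h)
    simp only [List.length_drop, List.length_cons]
    omega
  · simp

def handle_special_vocals_alt (text : String) : String :=
  String.ofList (pvScan text.toList)

-- ===== PRECONDITION & SPEC =====
def Spec_handle_special_vocals (text : String) (out : String) : Prop := out = handle_special_vocals_alt text
instance (text : String) (out : String) : Decidable (Spec_handle_special_vocals text out) := by unfold Spec_handle_special_vocals; infer_instance

-- ===== CLAIM (what is proved, stated in full; the proofs are below) =====
def Claim_equal_handle_special_vocals : Prop := ∀ (text : String), Dom_handle_special_vocals text → Spec_handle_special_vocals text (handle_special_vocals text)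

-- ===== LEMMAS AND PROOFS =====

-- generic table scan (proof device); the `max … 1` only makes it total without hypotheses
def scanG (ts : List (List Char × List Char)) (l : List Char) : List Char :=
  match l with
  | [] => []
  | c :: t =>
    match ts.find? (fun tp => tp.1.isPrefixOf (c :: t)) with
    | some tp => tp.2 ++ scanG ts (List.drop (max tp.1.length 1) (c :: t))
    | none => c :: scanG ts t
termination_by l.length
decreasing_by
  · simp only [List.length_drop, List.length_cons]
    omega
  · simp

lemma scanG_nil (ts : List (List Char × List Char)) : scanG ts [] = [] := by rw [scanG]

lemma scanG_cons (ts : List (List Char × List Char)) (c : Char) (t : List Char) :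
    scanG ts (c :: t) =
      match ts.find? (fun tp => tp.1.isPrefixOf (c :: t)) with
      | some tp => tp.2 ++ scanG ts (List.drop (max tp.1.length 1) (c :: t))
      | none => c :: scanG ts t := by
  rw [scanG]

lemma scanG_cons_some (ts : List (List Char × List Char)) (c : Char) (t : List Char)
    {tp : List Char × List Char}
    (h : ts.find? (fun tp => tp.1.isPrefixOf (c :: t)) = some tp) :
    scanG ts (c :: t) = tp.2 ++ scanG ts (List.drop (max tp.1.length 1) (c :: t)) := by
  rw [scanG_cons, h]

lemma scanG_cons_none (ts : List (List Char × List Char)) (c : Char) (t : List Char)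
    (h : ts.find? (fun tp => tp.1.isPrefixOf (c :: t)) = none) :
    scanG ts (c :: t) = c :: scanG ts t := by
  rw [scanG_cons, h]

lemma pvScan_cons_some (c : Char) (t : List Char) {tp : List Char × List Char}
    (h : pvTokens.find? (fun tp => tp.1.isPrefixOf (c :: t)) = some tp) :
    pvScan (c :: t) = tp.2 ++ pvScan (List.drop tp.1.length (c :: t)) := by
  rw [pvScan]
  split
  · next tp' h' =>
      rw [h] at h'
      cases h'
      rfl
  · next h' =>
      rw [h] at h'
      simp at h'

lemma pvScan_cons_none (c : Char) (t : List Char)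
    (h : pvTokens.find? (fun tp => tp.1.isPrefixOf (c :: t)) = none) :
    pvScan (c :: t) = c :: pvScan t := by
  rw [pvScan]
  split
  · next tp' h' =>
      rw [h] at h'
      simp at h'
  · next h' => rfl

lemma pvScan_eq_scanG (l : List Char) : pvScan l = scanG pvTokens l := by
  induction l using pvScan.induct with
  | case1 => rw [pvScan, scanG_nil]
  | case2 c t tp h ih =>
      have hpos := pvTokens_pos _ (List.mem_of_find?_eq_some h)
      rw [pvScan_cons_some _ _ h, scanG_cons_some _ _ _ h, Nat.max_eq_left hpos, ih]
  | case3 c t h ih =>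
      rw [pvScan_cons_none _ _ h, scanG_cons_none _ _ _ h, ih]

-- no table entry matches at a character that is not '<'
lemma find?_none_of_head_ne (ts : List (List Char × List Char))
    (hh : ∀ tp ∈ ts, tp.1.head? = some '<') (c : Char) (t : List Char) (hc : c ≠ '<') :
    ts.find? (fun tp => tp.1.isPrefixOf (c :: t)) = none := by
  rw [List.find?_eq_none]
  intro tp hm
  have hhd := hh tp hm
  cases htp : tp.1 with
  | nil => rw [htp] at hhd; simp at hhd
  | cons a w =>
      rw [htp] at hhd
      simp only [List.head?_cons, Option.some.injEq] at hhd
      subst hhd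
      intro hpre
      rcases List.isPrefixOf_iff_prefix.mp hpre with ⟨u, hu⟩
      simp only [List.cons_append, List.cons.injEq] at hu
      exact hc hu.1.symm

-- a '<'-free segment passes through the scan unchanged
lemma scanG_append_noLt (ts : List (List Char × List Char))
    (hh : ∀ tp ∈ ts, tp.1.head? = some '<') (a : List Char) (x : List Char)
    (ha : '<' ∉ a) : scanG ts (a ++ x) = a ++ scanG ts x := by
  induction a with
  | nil => simp
  | cons c a' ih =>
      have hc : c ≠ '<' := by intro h; exact ha (h ▸ List.mem_cons_self ..)
      have ha' : '<' ∉ a' := fun h => ha (List.mem_cons_of_mem _ h)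
      rw [List.cons_append, scanG_cons_none _ _ _ (find?_none_of_head_ne ts hh c _ hc), ih ha']
      simp

-- a space-free word that prefixes the scan's output already prefixes its input
lemma prefix_of_prefix_scanG (ts : List (List Char × List Char))
    (hp : ∀ tp ∈ ts, tp.2.head? = some ' ') (w : List Char) (hw : ' ' ∉ w) :
    ∀ r : List Char, w <+: scanG ts r → w <+: r := by
  induction w with
  | nil => intro r _; exact List.nil_prefix
  | cons a w' ih =>
      intro r hpre
      cases r with
      | nil =>
          rw [scanG_nil] at hpre
          exact absurd (List.prefix_nil.mp hpre) (by simp)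
      | cons c t =>
          cases hf : ts.find? (fun tp => tp.1.isPrefixOf (c :: t)) with
          | some tp =>
              rw [scanG_cons_some _ _ _ hf] at hpre
              have hsp := hp tp (List.mem_of_find?_eq_some hf)
              cases htp : tp.2 with
              | nil => rw [htp] at hsp; simp at hsp
              | cons b q =>
                  rw [htp] at hsp
                  simp only [List.head?_cons, Option.some.injEq] at hsp
                  rw [htp] at hpre
                  rcases hpre with ⟨u, hu⟩
                  simp only [List.cons_append, List.cons.injEq] at hu
                  exact absurd (hu.1 ▸ hsp ▸ List.mem_cons_self ..) hw
          | none =>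
              rw [scanG_cons_none _ _ _ hf] at hpre
              rcases hpre with ⟨u, hu⟩
              simp only [List.cons_append, List.cons.injEq] at hu
              have hw' : ' ' ∉ w' := fun h => hw (List.mem_cons_of_mem _ h)
              exact hu.1 ▸ List.cons_prefix_cons.mpr ⟨rfl, ih hw' t ⟨u, hu.2⟩⟩

-- Python str.replace (PySem): the scanning loop, with its explicit fuel
lemma replace_go_zero (old new s acc : List Char) :
    PySem.Chars.replace.go old new 0 s acc = acc.reverse ++ s := by cases s <;> rfl

lemma replace_go_succ_nil (old new acc : List Char) (f : Nat) :
    PySem.Chars.replace.go old new (f + 1) [] acc = acc.reverse := rfl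

lemma replace_go_succ_cons (old new t acc : List Char) (c : Char) (f : Nat) :
    PySem.Chars.replace.go old new (f + 1) (c :: t) acc =
      if old.isPrefixOf (c :: t) then
        PySem.Chars.replace.go old new f (List.drop old.length (c :: t)) (new.reverse ++ acc)
      else PySem.Chars.replace.go old new f t (c :: acc) := rfl

-- Python str.replace (PySem) is the single-token scan
lemma replace_go_eq (old new : List Char) (hold : old ≠ []) :
    ∀ (fuel : Nat) (s acc : List Char), s.length ≤ fuel →
      PySem.Chars.replace.go old new fuel s acc = acc.reverse ++ scanG [(old, new)] s := by
  intro fuel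
  induction fuel with
  | zero =>
      intro s acc hs
      have : s = [] := List.eq_nil_of_length_eq_zero (Nat.le_zero.mp hs)
      subst this
      rw [replace_go_zero, scanG_nil]
  | succ f ih =>
      intro s acc hs
      cases s with
      | nil => rw [replace_go_succ_nil, scanG_nil, List.append_nil]
      | cons c t =>
          rw [replace_go_succ_cons]
          have hop : 0 < old.length := List.length_pos_of_ne_nil hold
          by_cases hpre : old.isPrefixOf (c :: t) = true
          · rw [if_pos hpre]
            have hlen : (List.drop old.length (c :: t)).length ≤ f := by
              simp only [List.length_drop, List.length_cons]
              simp only [List.length_cons] at hs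
              omega
            rw [ih _ _ hlen, scanG_cons_some _ _ _ (List.find?_cons_of_pos (p := fun (tp : List Char × List Char) => tp.1.isPrefixOf (c :: t)) (l := []) hpre)]
            simp only [Nat.max_eq_left hop]
            simp
          · rw [if_neg hpre]
            have hlen : t.length ≤ f := by simp only [List.length_cons] at hs; omega
            rw [ih _ _ hlen,
              scanG_cons_none _ _ _ (by rw [List.find?_cons_of_neg (p := fun (tp : List Char × List Char) => tp.1.isPrefixOf (c :: t)) hpre, List.find?_nil])]
            simp

lemma replace_eq_scanG (s old new : List Char) (hold : old ≠ []) :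
    PySem.Chars.replace s old new = scanG [(old, new)] s := by
  rw [PySem.Chars.replace]
  rw [if_neg (by simp [List.isEmpty_iff, hold])]
  simpa using replace_go_eq old new hold s.length s [] le_rfl

-- MAIN STEP: one more sequential replace pass = the scan with one more table row
lemma scanG_step (ts : List (List Char × List Char)) (t0 p0 : List Char)
    (hh : ∀ tp ∈ ts, tp.1.head? = some '<')
    (hp : ∀ tp ∈ ts, tp.2.head? = some ' ')
    (hq : ∀ tp ∈ ts, '<' ∉ tp.2)
    (h0 : t0.head? = some '<') (h0a : '<' ∉ t0.tail) (h0b : ' ' ∉ t0.tail) :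
    ∀ (n : Nat) (l : List Char), l.length ≤ n →
      scanG [(t0, p0)] (scanG ts l) = scanG (ts ++ [(t0, p0)]) l := by
  have hh0 : ∀ tp ∈ ([(t0, p0)] : List (List Char × List Char)), tp.1.head? = some '<' := by
    intro tp hm; rw [List.mem_singleton.mp hm]; exact h0
  obtain ⟨w, hw⟩ : ∃ w, t0 = '<' :: w := by
    cases ht0 : t0 with
    | nil => rw [ht0] at h0; simp at h0
    | cons a w =>
        rw [ht0] at h0; simp only [List.head?_cons, Option.some.injEq] at h0
        exact ⟨w, by rw [h0]⟩
  have hp0pos : 0 < t0.length := by rw [hw]; simp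
  have hwlt : '<' ∉ w := by rw [hw] at h0a; simpa using h0a
  have hwsp : ' ' ∉ w := by rw [hw] at h0b; simpa using h0b
  intro n
  induction n with
  | zero =>
      intro l hl
      have : l = [] := List.eq_nil_of_length_eq_zero (Nat.le_zero.mp hl)
      subst this
      rw [scanG_nil, scanG_nil, scanG_nil]
  | succ n ih =>
      intro l hl
      cases l with
      | nil => rw [scanG_nil, scanG_nil, scanG_nil]
      | cons c t =>
          cases hf : ts.find? (fun tp => tp.1.isPrefixOf (c :: t)) with
          | some tp =>
              -- an earlier pass's token matches here: both sides emit its placeholder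
              have hmem := List.mem_of_find?_eq_some hf
              have hpos : 0 < tp.1.length := by
                have hhd := hh tp hmem
                cases htp : tp.1 with
                | nil => rw [htp] at hhd; simp at hhd
                | cons a u => simp
              have hrest : (List.drop tp.1.length (c :: t)).length ≤ n := by
                simp only [List.length_drop, List.length_cons]
                simp only [List.length_cons] at hl
                omega
              have hRHS : (ts ++ [(t0, p0)]).find?
                  (fun tp => tp.1.isPrefixOf (c :: t)) = some tp := by
                rw [List.find?_append, hf, Option.some_or]
              rw [scanG_cons_some _ _ _ hf, Nat.max_eq_left hpos]
              rw [scanG_append_noLt [(t0, p0)] hh0 tp.2 _ (hq tp hmem)]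
              rw [ih _ hrest]
              rw [scanG_cons_some _ _ _ hRHS, Nat.max_eq_left hpos]
          | none =>
              by_cases hp0 : t0.isPrefixOf (c :: t) = true
              · -- only the new token matches here
                have hdec := List.prefix_iff_eq_append.mp (List.isPrefixOf_iff_prefix.mp hp0)
                obtain ⟨r0, hr0⟩ : ∃ r0, c :: t = t0 ++ r0 := ⟨_, hdec.symm⟩
                have hRHSfind : (ts ++ [(t0, p0)]).find?
                    (fun tp => tp.1.isPrefixOf (c :: t)) = some (t0, p0) := by
                  rw [List.find?_append, hf, Option.none_or,
                    List.find?_cons_of_pos (p := fun (tp : List Char × List Char) => tp.1.isPrefixOf (c :: t)) hp0]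
                have hcw : c = '<' ∧ t = w ++ r0 := by
                  rw [hw] at hr0
                  simpa using hr0
                have hrestlen : r0.length ≤ n := by
                  have hlen := congrArg List.length hr0
                  rw [hw] at hlen
                  simp only [List.length_cons, List.length_append] at hlen
                  simp only [List.length_cons] at hl
                  omega
                have hdropr : List.drop t0.length (c :: t) = r0 := by
                  rw [hr0, List.drop_left]
                rw [scanG_cons_some _ _ _ hRHSfind, Nat.max_eq_left hp0pos, hdropr]
                rw [scanG_cons_none _ _ _ hf]
                conv_lhs => rw [hcw.2]
                rw [scanG_append_noLt ts hh w _ hwlt]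
                have houter : scanG [(t0, p0)] (c :: (w ++ scanG ts r0))
                    = p0 ++ scanG [(t0, p0)] (scanG ts r0) := by
                  have hpref : t0.isPrefixOf (c :: (w ++ scanG ts r0)) = true := by
                    rw [hcw.1, ← List.cons_append, ← hw]
                    exact List.isPrefixOf_iff_prefix.mpr (List.prefix_append _ _)
                  rw [scanG_cons_some _ _ _ (List.find?_cons_of_pos
                    (p := fun (tp : List Char × List Char) => tp.1.isPrefixOf (c :: (w ++ scanG ts r0))) (l := []) hpref)]
                  rw [Nat.max_eq_left hp0pos]
                  rw [hcw.1, ← List.cons_append, ← hw, List.drop_left]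
                rw [houter, ih _ hrestlen]
              · -- nothing matches here: both sides copy the character
                have hnof : (ts ++ [(t0, p0)]).find?
                    (fun tp => tp.1.isPrefixOf (c :: t)) = none := by
                  rw [List.find?_append, hf, Option.none_or,
                    List.find?_cons_of_neg (p := fun (tp : List Char × List Char) => tp.1.isPrefixOf (c :: t)) hp0,
                    List.find?_nil]
                have hlt : t.length ≤ n := by simp only [List.length_cons] at hl; omega
                have hnomatch : ¬ t0.isPrefixOf (c :: scanG ts t) = true := by
                  intro habs
                  rcases (hw ▸ List.isPrefixOf_iff_prefix.mp habs) with ⟨u, hu⟩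
                  simp only [List.cons_append, List.cons.injEq] at hu
                  have hwt := prefix_of_prefix_scanG ts hp w hwsp t ⟨u, hu.2⟩
                  exact hp0 (by
                    rw [hw, hu.1]
                    exact List.isPrefixOf_iff_prefix.mpr (List.cons_prefix_cons.mpr ⟨rfl, hwt⟩))
                rw [scanG_cons_none _ _ _ hf]
                rw [scanG_cons_none _ _ _
                  (by rw [List.find?_cons_of_neg
                    (p := fun (tp : List Char × List Char) => tp.1.isPrefixOf (c :: scanG ts t)) hnomatch,
                    List.find?_nil])]
                rw [ih _ hlt]
                rw [scanG_cons_none _ _ _ hnof]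

-- the full eleven-pass chain equals the eleven-row scan, on character lists
lemma chain_eq_pvScan (l : List Char) :
    PySem.Chars.replace (PySem.Chars.replace (PySem.Chars.replace (PySem.Chars.replace
      (PySem.Chars.replace (PySem.Chars.replace (PySem.Chars.replace (PySem.Chars.replace
      (PySem.Chars.replace (PySem.Chars.replace (PySem.Chars.replace l
        "<UH>".toList " ~UH~ ".toList) "<UM>".toList " ~UM~ ".toList)
        "<LAUGH>".toList " ~LAUGH~ ".toList) "<GIGGLE>".toList " ~GIGGLE~ ".toList)
        "<CHUCKLE>".toList " ~CHUCKLE~ ".toList) "<SIGH>".toList " ~SIGH~ ".toList)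
        "<COUGH>".toList " ~COUGH~ ".toList) "<SNIFFLE>".toList " ~SNIFFLE~ ".toList)
        "<GROAN>".toList " ~GROAN~ ".toList) "<YAWN>".toList " ~YAWN~ ".toList)
        "<GASP>".toList " ~GASP~ ".toList
      = pvScan l := by
  have step : ∀ (ts : List (List Char × List Char)) (t0 p0 : List Char),
      (∀ tp ∈ ts, tp.1.head? = some '<') → (∀ tp ∈ ts, tp.2.head? = some ' ') →
      (∀ tp ∈ ts, '<' ∉ tp.2) → t0.head? = some '<' → '<' ∉ t0.tail → ' ' ∉ t0.tail →
      ∀ x : List Char, scanG [(t0, p0)] (scanG ts x) = scanG (ts ++ [(t0, p0)]) x :=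
    fun ts t0 p0 hh hp hq h0 h0a h0b x =>
      scanG_step ts t0 p0 hh hp hq h0 h0a h0b x.length x le_rfl
  rw [replace_eq_scanG _ _ _ (by decide), replace_eq_scanG _ _ _ (by decide),
    replace_eq_scanG _ _ _ (by decide), replace_eq_scanG _ _ _ (by decide),
    replace_eq_scanG _ _ _ (by decide), replace_eq_scanG _ _ _ (by decide),
    replace_eq_scanG _ _ _ (by decide), replace_eq_scanG _ _ _ (by decide),
    replace_eq_scanG _ _ _ (by decide), replace_eq_scanG _ _ _ (by decide),
    replace_eq_scanG _ _ _ (by decide)]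
  rw [step [("<UH>".toList, " ~UH~ ".toList)] "<UM>".toList " ~UM~ ".toList
    (by decide) (by decide) (by decide) (by decide) (by decide) (by decide)]
  simp only [List.cons_append, List.nil_append]
  rw [step [("<UH>".toList, " ~UH~ ".toList), ("<UM>".toList, " ~UM~ ".toList)]
    "<LAUGH>".toList " ~LAUGH~ ".toList
    (by decide) (by decide) (by decide) (by decide) (by decide) (by decide)]
  simp only [List.cons_append, List.nil_append]
  rw [step [("<UH>".toList, " ~UH~ ".toList), ("<UM>".toList, " ~UM~ ".toList),
      ("<LAUGH>".toList, " ~LAUGH~ ".toList)] "<GIGGLE>".toList " ~GIGGLE~ ".toList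
    (by decide) (by decide) (by decide) (by decide) (by decide) (by decide)]
  simp only [List.cons_append, List.nil_append]
  rw [step [("<UH>".toList, " ~UH~ ".toList), ("<UM>".toList, " ~UM~ ".toList),
      ("<LAUGH>".toList, " ~LAUGH~ ".toList), ("<GIGGLE>".toList, " ~GIGGLE~ ".toList)]
    "<CHUCKLE>".toList " ~CHUCKLE~ ".toList
    (by decide) (by decide) (by decide) (by decide) (by decide) (by decide)]
  simp only [List.cons_append, List.nil_append]
  rw [step [("<UH>".toList, " ~UH~ ".toList), ("<UM>".toList, " ~UM~ ".toList),
      ("<LAUGH>".toList, " ~LAUGH~ ".toList), ("<GIGGLE>".toList, " ~GIGGLE~ ".toList),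
      ("<CHUCKLE>".toList, " ~CHUCKLE~ ".toList)] "<SIGH>".toList " ~SIGH~ ".toList
    (by decide) (by decide) (by decide) (by decide) (by decide) (by decide)]
  simp only [List.cons_append, List.nil_append]
  rw [step [("<UH>".toList, " ~UH~ ".toList), ("<UM>".toList, " ~UM~ ".toList),
      ("<LAUGH>".toList, " ~LAUGH~ ".toList), ("<GIGGLE>".toList, " ~GIGGLE~ ".toList),
      ("<CHUCKLE>".toList, " ~CHUCKLE~ ".toList), ("<SIGH>".toList, " ~SIGH~ ".toList)]
    "<COUGH>".toList " ~COUGH~ ".toList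
    (by decide) (by decide) (by decide) (by decide) (by decide) (by decide)]
  simp only [List.cons_append, List.nil_append]
  rw [step [("<UH>".toList, " ~UH~ ".toList), ("<UM>".toList, " ~UM~ ".toList),
      ("<LAUGH>".toList, " ~LAUGH~ ".toList), ("<GIGGLE>".toList, " ~GIGGLE~ ".toList),
      ("<CHUCKLE>".toList, " ~CHUCKLE~ ".toList), ("<SIGH>".toList, " ~SIGH~ ".toList),
      ("<COUGH>".toList, " ~COUGH~ ".toList)] "<SNIFFLE>".toList " ~SNIFFLE~ ".toList
    (by decide) (by decide) (by decide) (by decide) (by decide) (by decide)]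
  simp only [List.cons_append, List.nil_append]
  rw [step [("<UH>".toList, " ~UH~ ".toList), ("<UM>".toList, " ~UM~ ".toList),
      ("<LAUGH>".toList, " ~LAUGH~ ".toList), ("<GIGGLE>".toList, " ~GIGGLE~ ".toList),
      ("<CHUCKLE>".toList, " ~CHUCKLE~ ".toList), ("<SIGH>".toList, " ~SIGH~ ".toList),
      ("<COUGH>".toList, " ~COUGH~ ".toList), ("<SNIFFLE>".toList, " ~SNIFFLE~ ".toList)]
    "<GROAN>".toList " ~GROAN~ ".toList
    (by decide) (by decide) (by decide) (by decide) (by decide) (by decide)]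
  simp only [List.cons_append, List.nil_append]
  rw [step [("<UH>".toList, " ~UH~ ".toList), ("<UM>".toList, " ~UM~ ".toList),
      ("<LAUGH>".toList, " ~LAUGH~ ".toList), ("<GIGGLE>".toList, " ~GIGGLE~ ".toList),
      ("<CHUCKLE>".toList, " ~CHUCKLE~ ".toList), ("<SIGH>".toList, " ~SIGH~ ".toList),
      ("<COUGH>".toList, " ~COUGH~ ".toList), ("<SNIFFLE>".toList, " ~SNIFFLE~ ".toList),
      ("<GROAN>".toList, " ~GROAN~ ".toList)] "<YAWN>".toList " ~YAWN~ ".toList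
    (by decide) (by decide) (by decide) (by decide) (by decide) (by decide)]
  simp only [List.cons_append, List.nil_append]
  rw [step [("<UH>".toList, " ~UH~ ".toList), ("<UM>".toList, " ~UM~ ".toList),
      ("<LAUGH>".toList, " ~LAUGH~ ".toList), ("<GIGGLE>".toList, " ~GIGGLE~ ".toList),
      ("<CHUCKLE>".toList, " ~CHUCKLE~ ".toList), ("<SIGH>".toList, " ~SIGH~ ".toList),
      ("<COUGH>".toList, " ~COUGH~ ".toList), ("<SNIFFLE>".toList, " ~SNIFFLE~ ".toList),
      ("<GROAN>".toList, " ~GROAN~ ".toList), ("<YAWN>".toList, " ~YAWN~ ".toList)]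
    "<GASP>".toList " ~GASP~ ".toList
    (by decide) (by decide) (by decide) (by decide) (by decide) (by decide)]
  simp only [List.cons_append, List.nil_append]
  rw [pvScan_eq_scanG]
  rfl

-- ===== VERDICT (by name: the statement is the Claim_ definition above) =====
theorem handle_special_vocals_spec : Claim_equal_handle_special_vocals := by
  intro text _
  unfold Spec_handle_special_vocals handle_special_vocals handle_special_vocals_alt
  apply String.toList_inj.mp
  simp only [PySem.Str.toList_replace, String.toList_ofList]
  exact chain_eq_pvScan text.toList
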